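-- pv_equiv track=rewrite | github.com/MrBrantCode/unitest_baseline | mut_generate/mist_train_cf/cf_1797/solution.py | longest_common_palindrome_subsequence
-- ===== SOURCE A (Python) =====
-- def longest_common_palindrome_subsequence(str1, str2):
--     n = len(str1)
--     m = len(str2)
--
--     dp = [[0] * (m+1) for _ in range(n+1)]
--     palindrome = [[False] * (m+1) for _ in range(n+1)]
--
--     for i in range(1, n+1):
--         for j in range(1, m+1):
--             if str1[i-1] == str2[j-1]:
--                 dp[i][j] = dp[i-1][j-1] + 1
--                 if palindrome[i-1][j-1] or dp[i][j] == 1: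
--                     palindrome[i][j] = True
--             else:
--                 dp[i][j] = max(dp[i-1][j], dp[i][j-1])
--
--     lcs = ""
--     i, j = n, m
--
--     while i > 0 and j > 0:
--         if str1[i-1] == str2[j-1] and palindrome[i][j]:
--             lcs = str1[i-1] + lcs
--             i -= 1
--             j -= 1
--         elif dp[i-1][j] >= dp[i][j-1]:
--             i -= 1
--         else:
--             j -= 1
--
--     return len(lcs)
-- ===== SOURCE B (Python) =====
-- def longest_common_palindrome_subsequence(str1, str2):
--     n = len(str1)
--     m = len(str2)
--
--     # plain LCS table, row by row (no palindrome table at all)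
--     prev = [0] * (m + 1)
--     rows = [prev]
--     for i in range(1, n + 1):
--         cur = [0] * (m + 1)
--         c = str1[i - 1]
--         for j in range(1, m + 1):
--             if c == str2[j - 1]:
--                 cur[j] = prev[j - 1] + 1
--             else:
--                 a = prev[j]
--                 b = cur[j - 1]
--                 cur[j] = a if a >= b else b
--         rows.append(cur)
--         prev = cur
--
--     # backtrack; the palindrome flag of a cell is decided on the fly:
--     # it holds iff the maximal diagonal run of equal characters ending at
--     # (i, j) reaches a cell whose LCS value is 0.
--     count = 0
--     i, j = n, m
--     while i > 0 and j > 0: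
--         if str1[i - 1] == str2[j - 1]:
--             r = 1
--             while r < i and r < j and str1[i - 1 - r] == str2[j - 1 - r]:
--                 r += 1
--             if rows[i - r][j - r] == 0:
--                 count += 1
--                 i -= 1
--                 j -= 1
--                 continue
--         if rows[i - 1][j] >= rows[i][j - 1]:
--             i -= 1
--         else:
--             j -= 1
--     return count
-- ===== Notes on version B (the rewrite author's own statement) =====
-- stated objective: faster
-- what changed: B drops A's O(n*m) boolean palindrome table entirely: it fills only the LCS table row by row and, during backtracking, decides the palindrome flag on the fly by walking the maximal diagonal run of equal characters and testing whether the LCS value where the run ends is zero; intended as constant-factor faster (a timing run measured ~1.9-2.5x on its random inputs).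
import Mathlib
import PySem

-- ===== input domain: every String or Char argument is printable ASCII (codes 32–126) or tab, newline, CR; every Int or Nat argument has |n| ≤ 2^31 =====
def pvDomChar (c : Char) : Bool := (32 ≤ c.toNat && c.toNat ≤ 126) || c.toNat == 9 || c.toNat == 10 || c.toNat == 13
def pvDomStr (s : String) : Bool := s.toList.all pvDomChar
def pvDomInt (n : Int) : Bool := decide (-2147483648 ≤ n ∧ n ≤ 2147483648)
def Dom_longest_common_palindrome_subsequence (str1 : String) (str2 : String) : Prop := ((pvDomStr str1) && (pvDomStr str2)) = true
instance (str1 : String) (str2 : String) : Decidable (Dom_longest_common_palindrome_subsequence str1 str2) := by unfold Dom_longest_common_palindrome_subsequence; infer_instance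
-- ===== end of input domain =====

-- B drops A's palindrome table: it fills only the LCS table and decides the palindrome
-- flag during backtracking by walking the diagonal run of equal characters; intended as
-- constant-factor faster (one table and one test per cell instead of two; the timing
-- run measured B ~1.9-2.5x faster on its random inputs).

-- ===== PORT A =====
-- 2-D table access/update helpers (Python `t[i][j]` read and assignment at in-range indices)
def pvGet2 (t : List (List Int)) (i j : Nat) : Int := (t.getD i []).getD j 0
def pvGet2b (t : List (List Bool)) (i j : Nat) : Bool := (t.getD i []).getD j false
def pvSet2 (t : List (List Int)) (i j : Nat) (v : Int) : List (List Int) :=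
  t.set i ((t.getD i []).set j v)
def pvSet2b (t : List (List Bool)) (i j : Nat) (v : Bool) : List (List Bool) :=
  t.set i ((t.getD i []).set j v)

-- body of A's inner loop at cell (i, j)
def pvA_cell (s1 s2 : List Char) (st : List (List Int) × List (List Bool)) (i j : Nat) :
    List (List Int) × List (List Bool) :=
  if s1.getD (i-1) ' ' == s2.getD (j-1) ' ' then
    let dp' := pvSet2 st.1 i j (pvGet2 st.1 (i-1) (j-1) + 1)
    let pal' := if pvGet2b st.2 (i-1) (j-1) || (pvGet2 dp' i j == 1) then pvSet2b st.2 i j true else st.2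
    (dp', pal')
  else
    (pvSet2 st.1 i j (max (pvGet2 st.1 (i-1) j) (pvGet2 st.1 i (j-1))), st.2)

-- the two nested `for` loops filling dp and palindrome
def pvA_fill (s1 s2 : List Char) (n m : Nat) : List (List Int) × List (List Bool) :=
  (List.range' 1 n).foldl
    (fun st i => (List.range' 1 m).foldl (fun st j => pvA_cell s1 s2 st i j) st)
    (List.replicate (n+1) (List.replicate (m+1) 0), List.replicate (n+1) (List.replicate (m+1) false))

-- the `while i > 0 and j > 0` backtrack, accumulating the string `lcs`
def pvA_loop (s1 s2 : List Char) (dp : List (List Int)) (pal : List (List Bool)) :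
    Nat → Nat → List Char → List Char
  | i+1, j+1, lcs =>
    if (s1.getD i ' ' == s2.getD j ' ') && pvGet2b pal (i+1) (j+1) then
      pvA_loop s1 s2 dp pal i j (s1.getD i ' ' :: lcs)
    else if pvGet2 dp i (j+1) ≥ pvGet2 dp (i+1) j then
      pvA_loop s1 s2 dp pal i (j+1) lcs
    else
      pvA_loop s1 s2 dp pal (i+1) j lcs
  | _, _, lcs => lcs
  termination_by i j _ => i + j

def longest_common_palindrome_subsequence (str1 : String) (str2 : String) : Int :=
  let s1 := str1.toList
  let s2 := str2.toList
  let n := s1.length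
  let m := s2.length
  let st := pvA_fill s1 s2 n m
  ((pvA_loop s1 s2 st.1 st.2 n m []).length : Int)

-- ===== PORT B =====
-- one row of the LCS table, from the previous row (inner `for j` loop)
def pvB_row (s2 : List Char) (c : Char) (prev : List Int) (m : Nat) : List Int :=
  (List.range' 1 m).foldl
    (fun cur j =>
      if c == s2.getD (j-1) ' ' then cur.set j (prev.getD (j-1) 0 + 1)
      else
        let a := prev.getD j 0
        let b := cur.getD (j-1) 0
        cur.set j (if a ≥ b then a else b))
    (List.replicate (m+1) 0)

-- the outer `for i` loop: build all rows, keeping the list of rows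
def pvB_rows (s1 s2 : List Char) (n m : Nat) : List (List Int) :=
  ((List.range' 1 n).foldl
    (fun pr i =>
      let cur := pvB_row s2 (s1.getD (i-1) ' ') pr.1 m
      (cur, pr.2 ++ [cur]))
    (List.replicate (m+1) 0, [List.replicate (m+1) 0])).2

-- the inner `while` loop: length of the maximal diagonal run of equal characters ending at (i, j)
def pvB_run (s1 s2 : List Char) (i j : Nat) (r : Nat) : Nat :=
  if h : r < i ∧ r < j ∧ s1.getD (i-1-r) ' ' == s2.getD (j-1-r) ' ' then
    pvB_run s1 s2 i j (r+1)
  else r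
  termination_by i - r
  decreasing_by omega

-- the backtrack `while` loop, counting matches whose diagonal run reaches an LCS-0 cell
def pvB_loop (s1 s2 : List Char) (rows : List (List Int)) : Nat → Nat → Int → Int
  | i+1, j+1, cnt =>
    if s1.getD i ' ' == s2.getD j ' ' then
      let r := pvB_run s1 s2 (i+1) (j+1) 1
      if (rows.getD (i+1-r) []).getD (j+1-r) 0 == 0 then
        pvB_loop s1 s2 rows i j (cnt+1)
      else if (rows.getD i []).getD (j+1) 0 ≥ (rows.getD (i+1) []).getD j 0 then
        pvB_loop s1 s2 rows i (j+1) cnt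
      else
        pvB_loop s1 s2 rows (i+1) j cnt
    else if (rows.getD i []).getD (j+1) 0 ≥ (rows.getD (i+1) []).getD j 0 then
      pvB_loop s1 s2 rows i (j+1) cnt
    else
      pvB_loop s1 s2 rows (i+1) j cnt
  | _, _, cnt => cnt
  termination_by i j _ => i + j

def longest_common_palindrome_subsequence_alt (str1 : String) (str2 : String) : Int :=
  let s1 := str1.toList
  let s2 := str2.toList
  let n := s1.length
  let m := s2.length
  let rows := pvB_rows s1 s2 n m
  pvB_loop s1 s2 rows n m 0

-- ===== PRECONDITION & SPEC =====
def Spec_longest_common_palindrome_subsequence (str1 : String) (str2 : String) (out : Int) : Prop := out = longest_common_palindrome_subsequence_alt str1 str2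
instance (str1 : String) (str2 : String) (out : Int) : Decidable (Spec_longest_common_palindrome_subsequence str1 str2 out) := by unfold Spec_longest_common_palindrome_subsequence; infer_instance

-- ===== CLAIM (what is proved, stated in full; the proofs are below) =====
def Claim_equal_longest_common_palindrome_subsequence : Prop := ∀ (str1 : String) (str2 : String), Dom_longest_common_palindrome_subsequence str1 str2 → Spec_longest_common_palindrome_subsequence str1 str2 (longest_common_palindrome_subsequence str1 str2)

-- ===== LEMMAS AND PROOFS =====

-- the LCS recurrence as a pure function (reference model for both tables)
def dpF (s1 s2 : List Char) : Nat → Nat → Int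
  | 0, _ => 0
  | _+1, 0 => 0
  | i+1, j+1 =>
    if s1.getD i ' ' == s2.getD j ' ' then dpF s1 s2 i j + 1
    else max (dpF s1 s2 i (j+1)) (dpF s1 s2 (i+1) j)
  termination_by i j => i + j

-- the palindrome-flag recurrence
def palF (s1 s2 : List Char) : Nat → Nat → Bool
  | 0, _ => false
  | _+1, 0 => false
  | i+1, j+1 =>
    (s1.getD i ' ' == s2.getD j ' ') && (palF s1 s2 i j || (dpF s1 s2 (i+1) (j+1) == 1))
  termination_by i j => i + j

lemma dpF_zero_left (s1 s2 : List Char) (j : Nat) : dpF s1 s2 0 j = 0 := by cases j <;> simp [dpF]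
lemma dpF_zero_right (s1 s2 : List Char) (i : Nat) : dpF s1 s2 i 0 = 0 := by cases i <;> simp [dpF]

lemma dpF_nonneg (s1 s2 : List Char) (i j : Nat) : 0 ≤ dpF s1 s2 i j := by
  induction i generalizing j with
  | zero => simp [dpF_zero_left]
  | succ i ih =>
    induction j with
    | zero => simp [dpF_zero_right]
    | succ j ihj =>
      rw [dpF]
      split
      · have := ih j; omega
      · have := ih (j+1); omega

-- monotone in j, and Lipschitz in i, proved together by induction on i + j
lemma dpF_ml_aux (s1 s2 : List Char) : ∀ N i j, i + j ≤ N →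
    dpF s1 s2 i j ≤ dpF s1 s2 i (j+1) ∧ dpF s1 s2 (i+1) j ≤ dpF s1 s2 i j + 1 := by
  intro N
  induction N with
  | zero =>
    intro i j h
    have hi : i = 0 := by omega
    have hj : j = 0 := by omega
    subst hi; subst hj
    simp [dpF_zero_left, dpF_zero_right]
  | succ N ih =>
    intro i j h
    constructor
    · -- M2
      match i, j with
      | 0, j => simp [dpF_zero_left]
      | i+1, 0 =>
        rw [dpF_zero_right]
        exact dpF_nonneg s1 s2 (i+1) 1
      | i+1, j+1 =>
        have hM2ij := (ih i j (by omega)).1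
        have hM2ij1 := (ih i (j+1) (by omega)).1
        have hM2i1j := (ih (i+1) j (by omega)).1
        have hL1ij := (ih i j (by omega)).2
        have e2 : dpF s1 s2 (i+1) (j+1+1) =
            if s1.getD i ' ' == s2.getD (j+1) ' ' then dpF s1 s2 i (j+1) + 1
            else max (dpF s1 s2 i (j+1+1)) (dpF s1 s2 (i+1) (j+1)) := by conv_lhs => rw [dpF]
        have e1 : dpF s1 s2 (i+1) (j+1) =
            if s1.getD i ' ' == s2.getD j ' ' then dpF s1 s2 i j + 1
            else max (dpF s1 s2 i (j+1)) (dpF s1 s2 (i+1) j) := by conv_lhs => rw [dpF]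
        rw [e2, e1]
        split_ifs <;> (try simp only [le_max_iff, max_le_iff]) <;> omega
    · -- L1
      match i, j with
      | i, 0 => simp [dpF_zero_right]
      | 0, j+1 =>
        have hL10j : dpF s1 s2 1 j ≤ 1 := by
          have := (ih 0 j (by omega)).2
          rw [dpF_zero_left] at this
          simpa using this
        have e1 : dpF s1 s2 (0+1) (j+1) =
            if s1.getD 0 ' ' == s2.getD j ' ' then dpF s1 s2 0 j + 1
            else max (dpF s1 s2 0 (j+1)) (dpF s1 s2 (0+1) j) := by conv_lhs => rw [dpF]
        rw [e1, dpF_zero_left]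
        split_ifs <;>
          (try simp only [max_le_iff, dpF_zero_left, Nat.zero_add]) <;> omega
      | i+1, j+1 =>
        have hM2i1j := (ih (i+1) j (by omega)).1
        have hL1i1j := (ih (i+1) j (by omega)).2
        have e1 : dpF s1 s2 (i+1+1) (j+1) =
            if s1.getD (i+1) ' ' == s2.getD j ' ' then dpF s1 s2 (i+1) j + 1
            else max (dpF s1 s2 (i+1) (j+1)) (dpF s1 s2 (i+1+1) j) := by conv_lhs => rw [dpF]
        rw [e1]
        split_ifs <;> (try simp only [max_le_iff]) <;> omega

lemma dpF_mono_lip (s1 s2 : List Char) (i j : Nat) :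
    dpF s1 s2 i j ≤ dpF s1 s2 i (j+1) ∧ dpF s1 s2 (i+1) j ≤ dpF s1 s2 i j + 1 :=
  dpF_ml_aux s1 s2 (i+j) i j le_rfl

lemma dpF_mono_right (s1 s2 : List Char) (i j : Nat) : dpF s1 s2 i j ≤ dpF s1 s2 i (j+1) :=
  (dpF_mono_lip s1 s2 i j).1

lemma dpF_diag (s1 s2 : List Char) (i j : Nat) : dpF s1 s2 i j ≤ dpF s1 s2 (i+1) (j+1) := by
  rw [dpF]
  split
  · omega
  · have h1 := dpF_mono_right s1 s2 i j
    have : dpF s1 s2 i (j+1) ≤ max (dpF s1 s2 i (j+1)) (dpF s1 s2 (i+1) j) := le_max_left _ _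
    omega

lemma dpF_diag_sub (s1 s2 : List Char) (i j k : Nat) :
    dpF s1 s2 (i - k) (j - k) ≤ dpF s1 s2 i j := by
  induction k with
  | zero => simp
  | succ k ih =>
    have h : dpF s1 s2 (i - (k+1)) (j - (k+1)) ≤ dpF s1 s2 (i - k) (j - k) := by
      rcases Nat.eq_zero_or_pos (i - k) with h0 | h0
      · rw [show i - (k+1) = 0 by omega, dpF_zero_left]
        exact dpF_nonneg _ _ _ _
      rcases Nat.eq_zero_or_pos (j - k) with h1 | h1
      · rw [show j - (k+1) = 0 by omega, dpF_zero_right]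
        exact dpF_nonneg _ _ _ _
      have e1 : i - k = (i - (k+1)) + 1 := by omega
      have e2 : j - k = (j - (k+1)) + 1 := by omega
      rw [e1, e2]
      exact dpF_diag s1 s2 _ _
    omega


-- generic 2-D getD/set facts
lemma pv_getD_set_self {α : Type} (l : List α) (i : Nat) (v d : α) (h : i < l.length) :
    (l.set i v).getD i d = v := by
  simp [List.getD_eq_getElem?_getD, h]

lemma pv_getD_set_ne {α : Type} (l : List α) (i k : Nat) (v d : α) (h : i ≠ k) :
    (l.set i v).getD k d = l.getD k d := by
  simp [List.getD_eq_getElem?_getD, List.getElem?_set_ne h]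

lemma pv_set2_get_self {α : Type} (t : List (List α)) (d v : α) (i j : Nat)
    (h1 : i < t.length) (h2 : j < (t.getD i []).length) :
    ((t.set i ((t.getD i []).set j v)).getD i []).getD j d = v := by
  rw [pv_getD_set_self _ _ _ _ h1, pv_getD_set_self _ _ _ _ h2]

lemma pv_set2_get_ne {α : Type} (t : List (List α)) (d v : α) (i j a b : Nat)
    (hne : a ≠ i ∨ b ≠ j) :
    ((t.set i ((t.getD i []).set j v)).getD a []).getD b d = (t.getD a []).getD b d := by
  rcases hne with h | h
  · rw [pv_getD_set_ne _ _ _ _ _ (Ne.symm h)]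
  · by_cases hi : a = i
    · subst hi
      by_cases hlen : a < t.length
      · rw [pv_getD_set_self _ _ _ _ hlen, pv_getD_set_ne _ _ _ _ _ (Ne.symm h)]
      · rw [List.set_eq_of_length_le (by omega)]
    · rw [pv_getD_set_ne _ _ _ _ _ (Ne.symm hi)]

-- table shape: n+1 rows of length m+1
def pvShape {α : Type} (t : List (List α)) (n m : Nat) : Prop :=
  t.length = n + 1 ∧ ∀ r ∈ t, r.length = m + 1

lemma pvShape_row_len {α : Type} {t : List (List α)} {n m : Nat} (h : pvShape t n m)
    (i : Nat) (hi : i ≤ n) : (t.getD i []).length = m + 1 := by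
  have h1 := h.1
  have hlt : i < t.length := by omega
  rw [List.getD_eq_getElem?_getD, List.getElem?_eq_getElem hlt]
  exact h.2 _ (List.getElem_mem hlt)

lemma pvShape_set2 {α : Type} {t : List (List α)} {n m : Nat} (h : pvShape t n m)
    (i j : Nat) (v : α) : pvShape (t.set i ((t.getD i []).set j v)) n m := by
  by_cases hi : i < t.length
  · refine ⟨by simpa using h.1, ?_⟩
    intro r hr
    rcases List.mem_or_eq_of_mem_set hr with hr' | hr'
    · exact h.2 _ hr'
    · subst hr'
      have h1 := h.1
      have := pvShape_row_len h i (by omega)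
      simpa using this
  · rw [List.set_eq_of_length_le (by omega)]
    exact h

lemma pvShape_replicate {α : Type} (n m : Nat) (c : α) :
    pvShape (List.replicate (n+1) (List.replicate (m+1) c)) n m := by
  constructor
  · simp
  · intro r hr
    rw [List.eq_of_mem_replicate hr]
    simp

-- invariant of A's fill: rows 1..a and the first b cells of row a+1 hold their final values
def pvInvA (s1 s2 : List Char) (n m : Nat) (st : List (List Int) × List (List Bool)) (a b : Nat) : Prop :=
  pvShape st.1 n m ∧ pvShape st.2 n m ∧
  ∀ i j, i ≤ n → j ≤ m →
    pvGet2 st.1 i j = (if i ≤ a ∨ (i = a+1 ∧ j ≤ b) then dpF s1 s2 i j else 0) ∧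
    pvGet2b st.2 i j = (if i ≤ a ∨ (i = a+1 ∧ j ≤ b) then palF s1 s2 i j else false)

lemma pvInvA_write_both {s1 s2 : List Char} {n m : Nat} {st : List (List Int) × List (List Bool)}
    {a b : Nat} (h : pvInvA s1 s2 n m st a b) (ha : a < n) (hb : b < m)
    {dv : Int} {pv : Bool} (hdv : dv = dpF s1 s2 (a+1) (b+1)) (hpv : pv = palF s1 s2 (a+1) (b+1)) :
    pvInvA s1 s2 n m (pvSet2 st.1 (a+1) (b+1) dv, pvSet2b st.2 (a+1) (b+1) pv) a (b+1) := by
  obtain ⟨hs1, hs2, hv⟩ := h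
  refine ⟨pvShape_set2 hs1 _ _ _, pvShape_set2 hs2 _ _ _, ?_⟩
  intro i j hi hj
  have hL1 := hs1.1
  have hL2 := hs2.1
  by_cases hij : i = a+1 ∧ j = b+1
  · obtain ⟨hi', hj'⟩ := hij; subst hi'; subst hj'
    constructor
    · show pvGet2 (pvSet2 st.1 (a+1) (b+1) dv) (a+1) (b+1) = _
      rw [show pvGet2 (pvSet2 st.1 (a+1) (b+1) dv) (a+1) (b+1) = dv from
        pv_set2_get_self _ _ _ _ _ (by omega) (by rw [pvShape_row_len hs1 (a+1) (by omega)]; omega)]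
      simp [hdv]
    · show pvGet2b (pvSet2b st.2 (a+1) (b+1) pv) (a+1) (b+1) = _
      rw [show pvGet2b (pvSet2b st.2 (a+1) (b+1) pv) (a+1) (b+1) = pv from
        pv_set2_get_self _ _ _ _ _ (by omega) (by rw [pvShape_row_len hs2 (a+1) (by omega)]; omega)]
      simp [hpv]
  · have hne : i ≠ a+1 ∨ j ≠ b+1 := by tauto
    have e1 : pvGet2 (pvSet2 st.1 (a+1) (b+1) dv) i j = pvGet2 st.1 i j :=
      pv_set2_get_ne _ _ _ _ _ _ _ hne
    have e2 : pvGet2b (pvSet2b st.2 (a+1) (b+1) pv) i j = pvGet2b st.2 i j :=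
      pv_set2_get_ne _ _ _ _ _ _ _ hne
    have hcond : (i ≤ a ∨ (i = a+1 ∧ j ≤ b+1)) ↔ (i ≤ a ∨ (i = a+1 ∧ j ≤ b)) := by omega
    have := hv i j hi hj
    constructor
    · show pvGet2 (pvSet2 st.1 (a+1) (b+1) dv) i j = _
      rw [e1, this.1]
      simp only [hcond]
    · show pvGet2b (pvSet2b st.2 (a+1) (b+1) pv) i j = _
      rw [e2, this.2]
      simp only [hcond]

lemma pvInvA_write_dp {s1 s2 : List Char} {n m : Nat} {st : List (List Int) × List (List Bool)}
    {a b : Nat} (h : pvInvA s1 s2 n m st a b) (ha : a < n) (hb : b < m)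
    {dv : Int} (hdv : dv = dpF s1 s2 (a+1) (b+1)) (hpf : palF s1 s2 (a+1) (b+1) = false) :
    pvInvA s1 s2 n m (pvSet2 st.1 (a+1) (b+1) dv, st.2) a (b+1) := by
  obtain ⟨hs1, hs2, hv⟩ := h
  refine ⟨pvShape_set2 hs1 _ _ _, hs2, ?_⟩
  intro i j hi hj
  have hL1 := hs1.1
  by_cases hij : i = a+1 ∧ j = b+1
  · obtain ⟨hi', hj'⟩ := hij; subst hi'; subst hj'
    constructor
    · show pvGet2 (pvSet2 st.1 (a+1) (b+1) dv) (a+1) (b+1) = _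
      rw [show pvGet2 (pvSet2 st.1 (a+1) (b+1) dv) (a+1) (b+1) = dv from
        pv_set2_get_self _ _ _ _ _ (by omega) (by rw [pvShape_row_len hs1 (a+1) (by omega)]; omega)]
      simp [hdv]
    · show pvGet2b st.2 (a+1) (b+1) = _
      have := (hv (a+1) (b+1) hi hj).2
      rw [this]
      simp [hpf, show ¬ (a+1 ≤ a) by omega, show ¬ (b+1 ≤ b) by omega]
  · have hne : i ≠ a+1 ∨ j ≠ b+1 := by tauto
    have e1 : pvGet2 (pvSet2 st.1 (a+1) (b+1) dv) i j = pvGet2 st.1 i j :=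
      pv_set2_get_ne _ _ _ _ _ _ _ hne
    have hcond : (i ≤ a ∨ (i = a+1 ∧ j ≤ b+1)) ↔ (i ≤ a ∨ (i = a+1 ∧ j ≤ b)) := by omega
    have := hv i j hi hj
    constructor
    · show pvGet2 (pvSet2 st.1 (a+1) (b+1) dv) i j = _
      rw [e1, this.1]
      simp only [hcond]
    · show pvGet2b st.2 i j = _
      rw [this.2]
      simp only [hcond]

lemma pvInvA_cell {s1 s2 : List Char} {n m : Nat} {st : List (List Int) × List (List Bool)}
    {a b : Nat} (h : pvInvA s1 s2 n m st a b) (ha : a < n) (hb : b < m) :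
    pvInvA s1 s2 n m (pvA_cell s1 s2 st (a+1) (b+1)) a (b+1) := by
  have hv := h.2.2
  have hrd : pvGet2 st.1 a b = dpF s1 s2 a b := by
    have := (hv a b (by omega) (by omega)).1
    simpa using this
  have hrp : pvGet2b st.2 a b = palF s1 s2 a b := by
    have := (hv a b (by omega) (by omega)).2
    simpa using this
  have hup : pvGet2 st.1 a (b+1) = dpF s1 s2 a (b+1) := by
    have := (hv a (b+1) (by omega) (by omega)).1
    simpa using this
  have hlf : pvGet2 st.1 (a+1) b = dpF s1 s2 (a+1) b := by
    have := (hv (a+1) b (by omega) (by omega)).1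
    simpa [show ¬ (a+1 ≤ a) by omega] using this
  have hL1 := h.1.1
  have hrow1 := pvShape_row_len h.1 (a+1) (by omega)
  rw [pvA_cell]
  simp only [Nat.add_sub_cancel]
  by_cases hm : (s1.getD a ' ' == s2.getD b ' ') = true
  · rw [if_pos hm]
    have hdnew : dpF s1 s2 (a+1) (b+1) = dpF s1 s2 a b + 1 := by
      rw [dpF, if_pos hm]
    have hset : pvGet2 (pvSet2 st.1 (a+1) (b+1) (pvGet2 st.1 a b + 1)) (a+1) (b+1)
        = dpF s1 s2 a b + 1 := by
      rw [hrd]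
      exact pv_set2_get_self _ _ _ _ _ (by omega) (by rw [hrow1]; omega)
    have hpal : palF s1 s2 (a+1) (b+1)
        = (palF s1 s2 a b || (dpF s1 s2 a b + 1 == 1)) := by
      rw [palF, hm, Bool.true_and, hdnew]
    show pvInvA s1 s2 n m
      (pvSet2 st.1 (a+1) (b+1) (pvGet2 st.1 a b + 1),
        if pvGet2b st.2 a b || (pvGet2 (pvSet2 st.1 (a+1) (b+1) (pvGet2 st.1 a b + 1)) (a+1) (b+1) == 1)
          then pvSet2b st.2 (a+1) (b+1) true else st.2) a (b+1)
    rw [hset, hrp]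
    by_cases hc : (palF s1 s2 a b || (dpF s1 s2 a b + 1 == 1)) = true
    · rw [if_pos hc]
      exact pvInvA_write_both h ha hb (by rw [hrd, hdnew]) (by rw [hpal, hc])
    · rw [if_neg hc]
      exact pvInvA_write_dp h ha hb (by rw [hrd, hdnew]) (by rw [hpal]; simpa using hc)
  · rw [if_neg hm]
    have hdnew : dpF s1 s2 (a+1) (b+1) = max (dpF s1 s2 a (b+1)) (dpF s1 s2 (a+1) b) := by
      rw [dpF, if_neg hm]
    have hpf : palF s1 s2 (a+1) (b+1) = false := by
      have hm' : (s1.getD a ' ' == s2.getD b ' ') = false := by simpa using hm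
      rw [palF, hm', Bool.false_and]
    exact pvInvA_write_dp h ha hb (by rw [hup, hlf, hdnew]) hpf


lemma palF_zero_left (s1 s2 : List Char) (j : Nat) : palF s1 s2 0 j = false := by cases j <;> simp [palF]
lemma palF_zero_right (s1 s2 : List Char) (i : Nat) : palF s1 s2 i 0 = false := by cases i <;> simp [palF]

lemma pvInvA_init (s1 s2 : List Char) (n m : Nat) :
    pvInvA s1 s2 n m
      (List.replicate (n+1) (List.replicate (m+1) (0:Int)),
       List.replicate (n+1) (List.replicate (m+1) false)) 0 0 := by
  refine ⟨pvShape_replicate _ _ _, pvShape_replicate _ _ _, ?_⟩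
  intro i j hi hj
  have e1 : pvGet2 (List.replicate (n+1) (List.replicate (m+1) (0:Int))) i j = 0 := by
    simp [pvGet2, List.getD_eq_getElem?_getD, Nat.lt_succ_of_le hi, Nat.lt_succ_of_le hj]
  have e2 : pvGet2b (List.replicate (n+1) (List.replicate (m+1) false)) i j = false := by
    simp [pvGet2b, List.getD_eq_getElem?_getD, Nat.lt_succ_of_le hi, Nat.lt_succ_of_le hj]
  refine ⟨?_, ?_⟩
  · rw [e1]
    split_ifs with hc
    · rcases hc with hc | hc
      · rw [show i = 0 by omega, dpF_zero_left]
      · rw [hc.1, show j = 0 by omega, dpF_zero_right]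
    · rfl
  · rw [e2]
    split_ifs with hc
    · rcases hc with hc | hc
      · rw [show i = 0 by omega, palF_zero_left]
      · rw [hc.1, show j = 0 by omega, palF_zero_right]
    · rfl

lemma pvInvA_shift {s1 s2 : List Char} {n m : Nat} {st : List (List Int) × List (List Bool)}
    {a : Nat} (h : pvInvA s1 s2 n m st a m) : pvInvA s1 s2 n m st (a+1) 0 := by
  obtain ⟨h1, h2, hv⟩ := h
  refine ⟨h1, h2, ?_⟩
  intro i j hi hj
  have := hv i j hi hj
  refine ⟨?_, ?_⟩
  · rw [this.1]
    split_ifs with hc1 hc2 hc2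
    · rfl
    · exact absurd (by omega : i ≤ a+1 ∨ (i = a+1+1 ∧ j ≤ 0)) hc2
    · rw [show i = a+2 by omega, show j = 0 by omega, dpF_zero_right]
    · rfl
  · rw [this.2]
    split_ifs with hc1 hc2 hc2
    · rfl
    · exact absurd (by omega : i ≤ a+1 ∨ (i = a+1+1 ∧ j ≤ 0)) hc2
    · rw [show i = a+2 by omega, show j = 0 by omega, palF_zero_right]
    · rfl

lemma pvInvA_rowfold {s1 s2 : List Char} {n m : Nat} {a : Nat} (ha : a < n) :
    ∀ b, b ≤ m → ∀ st, pvInvA s1 s2 n m st a 0 →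
      pvInvA s1 s2 n m ((List.range' 1 b).foldl (fun st j => pvA_cell s1 s2 st (a+1) j) st) a b := by
  intro b
  induction b with
  | zero => intro _ st h; simpa using h
  | succ b ih =>
    intro hb st h
    rw [List.range'_concat, List.foldl_append]
    simp only [List.foldl_cons, List.foldl_nil]
    rw [show 1 + 1 * b = b + 1 by omega]
    exact pvInvA_cell (ih (by omega) st h) ha (by omega)

lemma pvInvA_fill (s1 s2 : List Char) (n m : Nat) :
    pvInvA s1 s2 n m (pvA_fill s1 s2 n m) n 0 := by
  rw [pvA_fill]
  have main : ∀ a, a ≤ n →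
      pvInvA s1 s2 n m ((List.range' 1 a).foldl
        (fun st i => (List.range' 1 m).foldl (fun st j => pvA_cell s1 s2 st i j) st)
        (List.replicate (n+1) (List.replicate (m+1) 0),
         List.replicate (n+1) (List.replicate (m+1) false))) a 0 := by
    intro a
    induction a with
    | zero => intro _; simpa using pvInvA_init s1 s2 n m
    | succ a ih =>
      intro ha
      rw [List.range'_concat, List.foldl_append]
      simp only [List.foldl_cons, List.foldl_nil]
      rw [show 1 + 1 * a = a + 1 by omega]
      exact pvInvA_shift (pvInvA_rowfold (by omega) m le_rfl _ (ih (by omega)))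
  exact main n le_rfl

-- final characterisation of A's tables
lemma pvA_fill_dp (s1 s2 : List Char) (n m i j : Nat) (hi : i ≤ n) (hj : j ≤ m) :
    pvGet2 (pvA_fill s1 s2 n m).1 i j = dpF s1 s2 i j := by
  have h := (pvInvA_fill s1 s2 n m).2.2 i j hi hj
  rw [h.1, if_pos (by omega)]

lemma pvA_fill_pal (s1 s2 : List Char) (n m i j : Nat) (hi : i ≤ n) (hj : j ≤ m) :
    pvGet2b (pvA_fill s1 s2 n m).2 i j = palF s1 s2 i j := by
  have h := (pvInvA_fill s1 s2 n m).2.2 i j hi hj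
  rw [h.2, if_pos (by omega)]


-- B's row builder produces row i+1 of the LCS table from row i
lemma pvB_row_spec (s1 s2 : List Char) (m : Nat) (i : Nat) (prev : List Int)
    (_hlen : prev.length = m + 1) (hprev : ∀ j, j ≤ m → prev.getD j 0 = dpF s1 s2 i j) :
    (pvB_row s2 (s1.getD i ' ') prev m).length = m + 1 ∧
    ∀ j, j ≤ m → (pvB_row s2 (s1.getD i ' ') prev m).getD j 0 = dpF s1 s2 (i+1) j := by
  rw [pvB_row]
  have main : ∀ b, b ≤ m →
      ((List.range' 1 b).foldl
        (fun cur j =>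
          if s1.getD i ' ' == s2.getD (j-1) ' ' then cur.set j (prev.getD (j-1) 0 + 1)
          else
            let a := prev.getD j 0
            let bb := cur.getD (j-1) 0
            cur.set j (if a ≥ bb then a else bb))
        (List.replicate (m+1) 0)).length = m + 1 ∧
      ∀ j, j ≤ m →
        ((List.range' 1 b).foldl
          (fun cur j =>
            if s1.getD i ' ' == s2.getD (j-1) ' ' then cur.set j (prev.getD (j-1) 0 + 1)
            else
              let a := prev.getD j 0
              let bb := cur.getD (j-1) 0
              cur.set j (if a ≥ bb then a else bb))
          (List.replicate (m+1) 0)).getD j 0 = (if j ≤ b then dpF s1 s2 (i+1) j else 0) := by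
    intro b
    induction b with
    | zero =>
      intro _
      constructor
      · simp
      · intro j hj
        simp only [List.range'_zero, List.foldl_nil]
        split_ifs with hc
        · rw [show j = 0 by omega, dpF_zero_right]
          simp
        · simp [List.getD_eq_getElem?_getD, Nat.lt_succ_of_le hj]
    | succ b ih =>
      intro hb
      obtain ⟨ihl, ihv⟩ := ih (by omega)
      rw [List.range'_concat, List.foldl_append]
      simp only [List.foldl_cons, List.foldl_nil]
      rw [show 1 + 1 * b = b + 1 by omega]
      set cur := (List.range' 1 b).foldl _ (List.replicate (m+1) (0:Int)) with hcur
      simp only [Nat.add_sub_cancel]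
      have hlt : b + 1 < cur.length := by omega
      have hnewval :
          (if s1.getD i ' ' == s2.getD b ' ' then cur.set (b+1) (prev.getD b 0 + 1)
           else cur.set (b+1) (if prev.getD (b+1) 0 ≥ cur.getD b 0 then prev.getD (b+1) 0 else cur.getD b 0))
          = cur.set (b+1) (dpF s1 s2 (i+1) (b+1)) := by
        by_cases hm' : (s1.getD i ' ' == s2.getD b ' ') = true
        · rw [if_pos hm', hprev b (by omega), show dpF s1 s2 (i+1) (b+1) = dpF s1 s2 i b + 1 from by rw [dpF, if_pos hm']]
        · rw [if_neg hm', hprev (b+1) (by omega), ihv b (by omega), if_pos (by omega : b ≤ b),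
            show dpF s1 s2 (i+1) (b+1) = max (dpF s1 s2 i (b+1)) (dpF s1 s2 (i+1) b) from by rw [dpF, if_neg hm']]
          congr 1
          split_ifs <;> omega
      refine ⟨by rw [hnewval]; simpa using ihl, ?_⟩
      intro j hj
      rw [hnewval]
      by_cases hjb : j = b + 1
      · subst hjb
        rw [pv_getD_set_self _ _ _ _ hlt, if_pos le_rfl]
      · rw [pv_getD_set_ne _ _ _ _ _ (fun h => hjb h.symm), ihv j hj]
        split_ifs <;> first | rfl | omega
  exact ⟨(main m le_rfl).1, fun j hj => by rw [(main m le_rfl).2 j hj, if_pos hj]⟩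

-- B's rows list holds the whole LCS table
lemma pvB_rows_get (s1 s2 : List Char) (n m : Nat) (i j : Nat) (hi : i ≤ n) (hj : j ≤ m) :
    ((pvB_rows s1 s2 n m).getD i []).getD j 0 = dpF s1 s2 i j := by
  rw [pvB_rows]
  have main : ∀ a, a ≤ n →
      (let st := (List.range' 1 a).foldl
        (fun pr i => (pvB_row s2 (s1.getD (i-1) ' ') pr.1 m, pr.2 ++ [pvB_row s2 (s1.getD (i-1) ' ') pr.1 m]))
        (List.replicate (m+1) 0, [List.replicate (m+1) 0]);
      st.1.length = m + 1 ∧ (∀ j, j ≤ m → st.1.getD j 0 = dpF s1 s2 a j) ∧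
      st.2.length = a + 1 ∧
      ∀ i' j', i' ≤ a → j' ≤ m → (st.2.getD i' []).getD j' 0 = dpF s1 s2 i' j') := by
    intro a
    induction a with
    | zero =>
      intro _
      refine ⟨by simp, ?_, by simp, ?_⟩
      · intro j hj
        rw [dpF_zero_left]
        simp [List.getD_eq_getElem?_getD, Nat.lt_succ_of_le hj]
      · intro i' j' hi' hj'
        rw [show i' = 0 by omega, dpF_zero_left]
        simp [List.getD_eq_getElem?_getD, Nat.lt_succ_of_le hj']
    | succ a ih =>
      intro ha
      obtain ⟨ihl, ihp, ihrl, ihr⟩ := ih (by omega)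
      rw [List.range'_concat, List.foldl_append]
      simp only [List.foldl_cons, List.foldl_nil]
      rw [show 1 + 1 * a - 1 = a by omega]
      set st := (List.range' 1 a).foldl _ (List.replicate (m+1) (0:Int), [List.replicate (m+1) (0:Int)]) with hst
      obtain ⟨hrl, hrv⟩ := pvB_row_spec s1 s2 m a st.1 ihl ihp
      refine ⟨hrl, hrv, by simp [ihrl], ?_⟩
      intro i' j' hi' hj'
      by_cases hia : i' = a + 1
      · subst hia
        rw [show a + 1 = st.2.length by omega]
        rw [show (st.2 ++ [pvB_row s2 (s1.getD a ' ') st.1 m]).getD st.2.length [] = pvB_row s2 (s1.getD a ' ') st.1 m from by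
          simp [List.getD_eq_getElem?_getD]]
        rw [show st.2.length = a + 1 by omega]
        exact hrv j' hj'
      · rw [List.getD_append _ _ _ _ (by omega)]
        exact ihr i' j' (by omega) hj'
  obtain ⟨_, _, hrl, hr⟩ := main n le_rfl
  exact hr i j hi hj


lemma pvB_run_shift (s1 s2 : List Char) (i j : Nat) : ∀ d r, i - r ≤ d →
    pvB_run s1 s2 (i+1) (j+1) (r+1) = pvB_run s1 s2 i j r + 1 := by
  intro d
  induction d with
  | zero =>
    intro r hr
    have hri : ¬ (r < i) := by omega
    rw [pvB_run, dif_neg (by omega), pvB_run, dif_neg (by omega)]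
  | succ d ihd =>
    intro r hr
    have hidx1 : i + 1 - 1 - (r+1) = i - 1 - r := by omega
    have hidx2 : j + 1 - 1 - (r+1) = j - 1 - r := by omega
    by_cases hC : r < i ∧ r < j ∧ (s1.getD (i-1-r) ' ' == s2.getD (j-1-r) ' ') = true
    · rw [pvB_run, dif_pos (by rw [hidx1, hidx2]; exact ⟨by omega, by omega, hC.2.2⟩)]
      rw [show pvB_run s1 s2 i j r = pvB_run s1 s2 i j (r+1) from by rw [pvB_run, dif_pos hC]]
      exact ihd (r+1) (by omega)
    · rw [pvB_run, dif_neg (by rw [hidx1, hidx2]; intro h; exact hC ⟨by omega, by omega, h.2.2⟩)]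
      rw [pvB_run, dif_neg hC]

-- the palindrome flag equals "the maximal diagonal run ends on an LCS-0 cell"
lemma palF_run (s1 s2 : List Char) : ∀ i j, (s1.getD i ' ' == s2.getD j ' ') = true →
    palF s1 s2 (i+1) (j+1)
      = (dpF s1 s2 (i+1 - pvB_run s1 s2 (i+1) (j+1) 1) (j+1 - pvB_run s1 s2 (i+1) (j+1) 1) == 0) := by
  intro i
  induction i with
  | zero =>
    intro j hm
    rw [show pvB_run s1 s2 (0+1) (j+1) 1 = 1 from by
      rw [pvB_run, dif_neg (fun h => absurd h.1 (by omega))]]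
    have hd : dpF s1 s2 (0+1) (j+1) = dpF s1 s2 0 j + 1 := by
      conv_lhs => rw [dpF]
      rw [if_pos hm]
    rw [palF, hm, Bool.true_and, palF_zero_left, Bool.false_or, hd]
    simp only [Nat.add_sub_cancel, dpF_zero_left]
    decide
  | succ i ihi =>
    intro j hm
    by_cases hC : 0 < j ∧ (s1.getD i ' ' == s2.getD (j-1) ' ') = true
    · obtain ⟨hj0, hmm⟩ := hC
      obtain ⟨j', rfl⟩ : ∃ j', j = j' + 1 := ⟨j - 1, by omega⟩
      simp only [Nat.add_sub_cancel] at hmm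
      have hstep : pvB_run s1 s2 (i+1+1) (j'+1+1) 1 = pvB_run s1 s2 (i+1+1) (j'+1+1) (1+1) := by
        conv_lhs => rw [pvB_run]
        rw [dif_pos (by
          refine ⟨by omega, by omega, ?_⟩
          simpa using hmm)]
      have hrun1 : pvB_run s1 s2 (i+1+1) (j'+1+1) 1 = pvB_run s1 s2 (i+1) (j'+1) 1 + 1 := by
        rw [hstep]
        exact pvB_run_shift s1 s2 (i+1) (j'+1) (i+1) 1 (by omega)
      have ih := ihi j' hmm
      rw [palF, hm, Bool.true_and, ih]
      rw [show dpF s1 s2 (i+1+1) (j'+1+1) = dpF s1 s2 (i+1) (j'+1) + 1 from by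
        conv_lhs => rw [dpF]
        rw [if_pos hm]]
      set r' := pvB_run s1 s2 (i+1) (j'+1) 1 with hr'
      rw [hrun1]
      have hidx1 : i+1+1 - (r'+1) = i+1 - r' := by omega
      have hidx2 : j'+1+1 - (r'+1) = j'+1 - r' := by omega
      rw [hidx1, hidx2]
      have hmono : dpF s1 s2 (i+1 - r') (j'+1 - r') ≤ dpF s1 s2 (i+1) (j'+1) :=
        dpF_diag_sub s1 s2 (i+1) (j'+1) r'
      have hnn := dpF_nonneg s1 s2 (i+1 - r') (j'+1 - r')
      by_cases hb : dpF s1 s2 (i+1) (j'+1) = 0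
      · have ha : dpF s1 s2 (i+1 - r') (j'+1 - r') = 0 := by omega
        simp [ha, hb]
      · by_cases ha : dpF s1 s2 (i+1 - r') (j'+1 - r') = 0 <;> simp [ha, hb]
    · have hrun : pvB_run s1 s2 (i+1+1) (j+1) 1 = 1 := by
        rw [pvB_run, dif_neg (by
          intro h
          exact hC ⟨by omega, by simpa using h.2.2⟩)]
      rw [hrun]
      rw [palF, hm, Bool.true_and]
      have hpalij : palF s1 s2 (i+1) j = false := by
        rcases Nat.eq_zero_or_pos j with hj | hj
        · rw [hj, palF_zero_right]
        · obtain ⟨j', rfl⟩ : ∃ j', j = j' + 1 := ⟨j - 1, by omega⟩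
          have : (s1.getD i ' ' == s2.getD j' ' ') = false := by
            by_cases h : (s1.getD i ' ' == s2.getD j' ' ') = true
            · exact absurd ⟨by omega, by simpa using h⟩ hC
            · simpa using h
          rw [palF, this, Bool.false_and]
      rw [hpalij, Bool.false_or]
      rw [show dpF s1 s2 (i+1+1) (j+1) = dpF s1 s2 (i+1) j + 1 from by
        conv_lhs => rw [dpF]
        rw [if_pos hm]]
      simp only [Nat.add_sub_cancel]
      by_cases h : dpF s1 s2 (i+1) j = 0 <;> simp [h]

-- the two backtracking loops agree cell by cell
lemma pv_loop_eq (s1 s2 : List Char) (n m : Nat)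
    (dp : List (List Int)) (pal : List (List Bool)) (rows : List (List Int))
    (hdp : ∀ i j, i ≤ n → j ≤ m → pvGet2 dp i j = dpF s1 s2 i j)
    (hpal : ∀ i j, i ≤ n → j ≤ m → pvGet2b pal i j = palF s1 s2 i j)
    (hrows : ∀ i j, i ≤ n → j ≤ m → ((rows.getD i []).getD j 0) = dpF s1 s2 i j) :
    ∀ N i j, i + j ≤ N → i ≤ n → j ≤ m → ∀ (lcs : List Char),
      ((pvA_loop s1 s2 dp pal i j lcs).length : Int)
        = pvB_loop s1 s2 rows i j (lcs.length : Int) := by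
  intro N
  induction N with
  | zero =>
    intro i j hN hi hj lcs
    match i, j with
    | 0, j => rw [pvA_loop, pvB_loop] <;> (intros; omega)
    | i+1, 0 => rw [pvA_loop, pvB_loop] <;> (intros; omega)
    | i+1, j+1 => exact absurd hN (by omega)
  | succ N ihN =>
    intro i j hN hi hj lcs
    match i, j with
    | 0, j => rw [pvA_loop, pvB_loop] <;> (intros; omega)
    | i+1, 0 => rw [pvA_loop, pvB_loop] <;> (intros; omega)
    | i+1, j+1 =>
      rw [pvA_loop, pvB_loop]
      have htie :
          (((if pvGet2 dp i (j+1) ≥ pvGet2 dp (i+1) j then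
              pvA_loop s1 s2 dp pal i (j+1) lcs
            else pvA_loop s1 s2 dp pal (i+1) j lcs).length : Int))
          = (if (rows.getD i []).getD (j+1) 0 ≥ (rows.getD (i+1) []).getD j 0 then
              pvB_loop s1 s2 rows i (j+1) (lcs.length : Int)
            else pvB_loop s1 s2 rows (i+1) j (lcs.length : Int)) := by
        rw [apply_ite (fun l : List Char => (l.length : Int))]
        rw [hdp i (j+1) (by omega) hj, hdp (i+1) j hi (by omega),
          hrows i (j+1) (by omega) hj, hrows (i+1) j hi (by omega)]
        split_ifs with hge
        · exact ihN i (j+1) (by omega) (by omega) hj lcs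
        · exact ihN (i+1) j (by omega) hi (by omega) lcs
      by_cases hm : (s1.getD i ' ' == s2.getD j ' ') = true
      · simp only [hm, Bool.true_and, if_true]
        rw [hpal (i+1) (j+1) hi hj, palF_run s1 s2 i j hm,
          hrows (i+1 - pvB_run s1 s2 (i+1) (j+1) 1) (j+1 - pvB_run s1 s2 (i+1) (j+1) 1)
            (by omega) (by omega)]
        by_cases hz : (dpF s1 s2 (i+1 - pvB_run s1 s2 (i+1) (j+1) 1)
            (j+1 - pvB_run s1 s2 (i+1) (j+1) 1) == 0) = true
        · rw [if_pos hz, if_pos hz]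
          rw [ihN i j (by omega) (by omega) (by omega) (s1.getD i ' ' :: lcs)]
          simp only [List.length_cons]
          push_cast
          ring_nf
        · rw [if_neg hz, if_neg hz]
          exact htie
      · have hm' : (s1.getD i ' ' == s2.getD j ' ') = false := by simpa using hm
        simp only [hm', Bool.false_and, Bool.false_eq_true, if_false]
        exact htie

-- ===== VERDICT (by name: the statement is the Claim_ definition above) =====
theorem longest_common_palindrome_subsequence_spec : Claim_equal_longest_common_palindrome_subsequence := by
  intro str1 str2 _
  unfold Spec_longest_common_palindrome_subsequence
  rw [longest_common_palindrome_subsequence, longest_common_palindrome_subsequence_alt]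
  have h := pv_loop_eq str1.toList str2.toList str1.toList.length str2.toList.length
    (pvA_fill str1.toList str2.toList str1.toList.length str2.toList.length).1
    (pvA_fill str1.toList str2.toList str1.toList.length str2.toList.length).2
    (pvB_rows str1.toList str2.toList str1.toList.length str2.toList.length)
    (fun i j hi hj => pvA_fill_dp _ _ _ _ i j hi hj)
    (fun i j hi hj => pvA_fill_pal _ _ _ _ i j hi hj)
    (fun i j hi hj => pvB_rows_get _ _ _ _ i j hi hj)
    (str1.toList.length + str2.toList.length) _ _ le_rfl le_rfl le_rfl []
  simpa using h
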